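-- pv_equiv track=rewrite | github.com/acorg/light-matter | light/landmarks/predicted_structure.py | getStructureOffsets
-- ===== SOURCE A (Python) =====
-- from collections import defaultdict
--
-- def getStructureOffsets(ssSequence):
--     """
--     Takes a structure sequence, and returns a dictionary that contains the
--     offsets for each structure.
--
--     @param ssSequence: A C{str} structure sequence.
--     """
--     result = defaultdict(list)
--
--     previous = None
--     start = 0
--     for i, item in enumerate(ssSequence):
--         # item is the last item of the sequence
--         try:
--             ssSequence[i + 1]
--         except IndexError:
--             if item == previous:
--                 result[item].append([start, i])
--             else:
--                 result[item].append([i, i])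
--             break
--         if item == previous and ssSequence[i + 1] != item:
--             result[item].append([start, i])
--         # item is the only item of the sequence
--         elif item != previous and ssSequence[i + 1] != item:
--             previous = item
--             result[item].append([i, i])
--         # item is the first one in the sequence:
--         elif item != previous and ssSequence[i + 1] == item:
--             previous = item
--             start = i
--     return result
-- ===== SOURCE B (Python) =====
-- from collections import defaultdict
--
-- def getStructureOffsets(ssSequence):
--     """Run-length pass: for each maximal run of one character, record its
--     [first, last] offsets, jumping the index to the end of the run."""
--     result = defaultdict(list)
--     n = len(ssSequence)
--     i = 0
--     while i < n:
--         j = i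
--         while j + 1 < n and ssSequence[j + 1] == ssSequence[i]:
--             j += 1
--         result[ssSequence[i]].append([i, j])
--         i = j + 1
--     return result
-- ===== Notes on version B (the rewrite author's own statement) =====
-- stated objective: simpler
-- what changed: Replaced A's per-character state machine (previous/start bookkeeping with try/except lookahead and four branches) by a run-skipping loop that finds the end of each maximal run directly and appends [start, end] in one step.
import Mathlib
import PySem

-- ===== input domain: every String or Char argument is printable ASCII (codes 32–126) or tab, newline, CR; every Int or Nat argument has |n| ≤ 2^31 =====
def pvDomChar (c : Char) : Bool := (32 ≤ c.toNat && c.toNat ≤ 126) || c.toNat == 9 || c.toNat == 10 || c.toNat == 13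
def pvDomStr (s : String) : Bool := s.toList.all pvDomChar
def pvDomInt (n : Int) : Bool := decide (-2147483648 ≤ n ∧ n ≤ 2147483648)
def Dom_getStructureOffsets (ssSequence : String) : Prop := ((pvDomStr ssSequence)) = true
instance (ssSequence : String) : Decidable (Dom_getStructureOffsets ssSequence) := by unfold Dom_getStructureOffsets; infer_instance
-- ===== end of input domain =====

-- B replaces A's per-character previous/start state machine by a run-skipping loop; objective: simpler.

-- ===== PORT A =====
-- state machine over the characters with (result, previous, start), branches in A's order
def goA : List Char → Int → PySem.Dict String (List (List Int)) → Option Char → Int →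
    PySem.Dict String (List (List Int))
  | [], _, d, _, _ => d
  | item :: rest, i, d, previous, start =>
    match rest with
    | [] =>  -- try: ssSequence[i+1] raises IndexError → last item, then break
      if previous = some item then d.modify (String.ofList [item]) [] (· ++ [[start, i]])
      else d.modify (String.ofList [item]) [] (· ++ [[i, i]])
    | next :: _ =>
      if previous = some item ∧ next ≠ item then
        goA rest (i + 1) (d.modify (String.ofList [item]) [] (· ++ [[start, i]])) previous start
      else if previous ≠ some item ∧ next ≠ item then
        goA rest (i + 1) (d.modify (String.ofList [item]) [] (· ++ [[i, i]])) (some item) start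
      else if previous ≠ some item ∧ next = item then
        goA rest (i + 1) d (some item) i
      else
        goA rest (i + 1) d previous start

def getStructureOffsets (ssSequence : String) : List (String × List (List Int)) :=
  (goA ssSequence.toList 0 PySem.Dict.empty none 0).items

-- ===== PORT B =====
-- inner while loop of Source B: number of further characters continuing the run of c
def runLen (c : Char) : List Char → Nat
  | [] => 0
  | x :: xs => if x = c then runLen c xs + 1 else 0

-- outer while loop of Source B
def goB : List Char → Int → PySem.Dict String (List (List Int)) →
    PySem.Dict String (List (List Int))
  | [], _, d => d
  | c :: rest, i, d =>
    let k := runLen c rest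
    goB (rest.drop k) (i + (k : Int) + 1)
      (d.modify (String.ofList [c]) [] (· ++ [[i, i + (k : Int)]]))
termination_by l => l.length
decreasing_by
  simp only [List.length_drop, List.length_cons]
  omega

def getStructureOffsets_alt (ssSequence : String) : List (String × List (List Int)) :=
  (goB ssSequence.toList 0 PySem.Dict.empty).items

-- ===== PRECONDITION & SPEC =====
def Spec_getStructureOffsets (ssSequence : String) (out : List (String × List (List Int))) : Prop := out = getStructureOffsets_alt ssSequence
instance (ssSequence : String) (out : List (String × List (List Int))) : Decidable (Spec_getStructureOffsets ssSequence out) := by unfold Spec_getStructureOffsets; infer_instance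

-- ===== CLAIM (what is proved, stated in full; the proofs are below) =====
def Claim_equal_getStructureOffsets : Prop := ∀ (ssSequence : String), Dom_getStructureOffsets ssSequence → Spec_getStructureOffsets ssSequence (getStructureOffsets ssSequence)

-- ===== LEMMAS AND PROOFS =====

theorem runLen_cons_self (c : Char) (xs : List Char) : runLen c (c :: xs) = runLen c xs + 1 := by
  simp [runLen]

theorem runLen_cons_ne {x c : Char} (h : x ≠ c) (xs : List Char) : runLen c (x :: xs) = 0 := by
  simp [runLen, h]

theorem goB_nil (i : Int) (d : PySem.Dict String (List (List Int))) : goB [] i d = d := by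
  rw [goB]

-- the state of B's loop just after it has emitted the run [start, i + runLen]
def midRHS (c : Char) (l : List Char) (i : Int) (d : PySem.Dict String (List (List Int)))
    (start : Int) : PySem.Dict String (List (List Int)) :=
  goB (l.drop (runLen c l)) (i + (runLen c l : Int) + 1)
    (d.modify (String.ofList [c]) [] (· ++ [[start, i + (runLen c l : Int)]]))

theorem goB_cons (c : Char) (l : List Char) (i : Int) (d : PySem.Dict String (List (List Int))) :
    goB (c :: l) i d = midRHS c l i d i := by
  rw [goB, midRHS]

theorem midRHS_nil (c : Char) (i : Int) (d : PySem.Dict String (List (List Int))) (start : Int) :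
    midRHS c [] i d start = d.modify (String.ofList [c]) [] (· ++ [[start, i]]) := by
  simp [midRHS, runLen, goB_nil]

theorem midRHS_cons_self (c : Char) (l : List Char) (i : Int)
    (d : PySem.Dict String (List (List Int))) (start : Int) :
    midRHS c (c :: l) i d start = midRHS c l (i + 1) d start := by
  unfold midRHS
  rw [runLen_cons_self]
  simp only [List.drop_succ_cons]
  have h1 : ((runLen c l + 1 : Nat) : Int) = (runLen c l : Int) + 1 := by push_cast; ring
  rw [h1]
  have h2 : i + ((runLen c l : Int) + 1) = i + 1 + (runLen c l : Int) := by ring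
  rw [h2]

theorem midRHS_cons_ne {x c : Char} (h : x ≠ c) (l : List Char) (i : Int)
    (d : PySem.Dict String (List (List Int))) (start : Int) :
    midRHS c (x :: l) i d start
      = goB (x :: l) (i + 1) (d.modify (String.ofList [c]) [] (· ++ [[start, i]])) := by
  unfold midRHS
  rw [runLen_cons_ne h]
  norm_num

-- combined invariant: outside a run A's loop behaves like B's; inside a run of c it
-- finishes the run exactly as B's midRHS state does
theorem goA_eq (n : Nat) : ∀ l : List Char, l.length ≤ n →
    ((∀ i d prev start, (∀ c rest, l = c :: rest → prev ≠ some c) →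
        goA l i d prev start = goB l i d) ∧
     (∀ c i d start, goA (c :: l) i d (some c) start = midRHS c l i d start)) := by
  induction n with
  | zero =>
    intro l hl
    have : l = [] := List.eq_nil_of_length_eq_zero (Nat.le_zero.mp hl)
    subst this
    refine ⟨fun i d prev start _ => (goB_nil i d).symm, fun c i d start => ?_⟩
    rw [midRHS_nil]
    simp [goA]
  | succ n ih =>
    intro l hl
    have main : ∀ l' : List Char, l'.length ≤ n + 1 →
        ∀ i d prev start, (∀ c rest, l' = c :: rest → prev ≠ some c) →
          goA l' i d prev start = goB l' i d := by
      intro l' hl' i d prev start hprev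
      match l' with
      | [] => exact (goB_nil i d).symm
      | c :: rest =>
        have hpc : prev ≠ some c := hprev c rest rfl
        rw [goB_cons]
        match rest with
        | [] =>
          rw [midRHS_nil]
          simp [goA, hpc]
        | next :: rest' =>
          by_cases hnc : next = c
          · subst hnc
            rw [goA]
            rw [if_neg (fun h => h.2 rfl), if_neg (fun h => h.2 rfl),
              if_pos (And.intro hpc rfl)]
            have hrest' : rest'.length ≤ n := by
              simp only [List.length_cons] at hl'; omega
            rw [(ih rest' hrest').2 next (i + 1) d i]
            rw [midRHS_cons_self]
          · rw [goA]
            rw [if_neg (fun h => hpc h.1), if_pos (And.intro hpc hnc)]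
            have hr : (next :: rest').length ≤ n := by
              simp only [List.length_cons] at hl' ⊢; omega
            rw [(ih (next :: rest') hr).1 (i + 1)
              (d.modify (String.ofList [c]) [] (· ++ [[i, i]])) (some c) start
              (fun c' r' he => by
                injection he with h1 _; subst h1
                intro hx; injection hx with hx'; exact hnc hx'.symm)]
            rw [midRHS_cons_ne hnc]
    refine ⟨main l hl, ?_⟩
    -- inside a run of c
    intro c i d start
    match l with
    | [] =>
      rw [midRHS_nil]
      simp [goA]
    | next :: rest' =>
      by_cases hnc : next = c
      · subst hnc
        rw [goA]
        rw [if_neg (fun h => h.2 rfl), if_neg (fun h => h.1 rfl), if_neg (fun h => h.1 rfl)]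
        have hrest' : rest'.length ≤ n := by simp only [List.length_cons] at hl; omega
        rw [(ih rest' hrest').2 next (i + 1) d start]
        rw [midRHS_cons_self]
      · rw [goA]
        rw [if_pos (And.intro rfl hnc)]
        rw [main (next :: rest') hl (i + 1)
          (d.modify (String.ofList [c]) [] (· ++ [[start, i]])) (some c) start
          (fun c' r' he => by
            injection he with h1 _; subst h1
            intro hx; injection hx with hx'; exact hnc hx'.symm)]
        rw [midRHS_cons_ne hnc]

-- ===== VERDICT (by name: the statement is the Claim_ definition above) =====
theorem getStructureOffsets_spec : Claim_equal_getStructureOffsets := by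
  unfold Claim_equal_getStructureOffsets
  intro s _
  unfold Spec_getStructureOffsets getStructureOffsets getStructureOffsets_alt
  congr 1
  exact (goA_eq s.toList.length s.toList (Nat.le_refl _)).1 0 PySem.Dict.empty none 0
    (fun c rest _ h => by cases h)
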